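-- pv_equiv track=rewrite | github.com/DeshErBojhaa/sports_programming | leetcode/1760.py | minimumSize
-- ===== SOURCE A (Python) =====
-- from typing import List
--
-- def minimumSize(nums: List[int], mop: int) -> int:
--     lo, hi = 1, max(nums)
--     def can(mv):
--         op = 0
--         for x in nums:
--             if x <= mv:
--                 continue
--             op += x//mv - (x%mv == 0)
--             if op > mop:
--                 return False
--         return True
--
--     while lo < hi:
--         mid = (lo + hi) // 2
--         if can(mid):
--             hi = mid
--         else:
--             lo = mid + 1
--     return lo
-- ===== SOURCE B (Python) =====
-- from typing import List
--
-- def minimumSize(nums: List[int], mop: int) -> int: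
--     # Greedy simulation: repeatedly take the bag whose current largest piece
--     # attains the global maximum and split it just enough to push that piece
--     # one level down (to at most best - 1), charging the operations used,
--     # until the budget runs out or no piece exceeds 1.
--     bags = [(x, 1) for x in nums]          # (original size, number of pieces)
--
--     def piece(b):
--         x, k = b
--         return -(-x // k)                  # exact ceiling of x/k
--
--     best = max(piece(b) for b in bags)     # ValueError on [] like A's max(nums)
--     ops = mop
--     while ops > 0 and best > 1:
--         i = next(j for j, b in enumerate(bags) if piece(b) == best)
--         x, k = bags[i]
--         k2 = min(-(-x // (best - 1)), k + ops)   # pieces <= best-1, budget allowing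
--         ops -= k2 - k
--         bags[i] = (x, k2)
--         best = max(piece(b) for b in bags)
--     return max(best, 1)
-- ===== Notes on version B (the rewrite author's own statement) =====
-- stated objective: alternative
-- what changed: Replaces the binary search over the answer (with its feasibility predicate can()) by a direct greedy simulation: every bag starts as one piece and the loop repeatedly splits the bag whose current largest piece attains the global maximum, batching the splits needed to push that piece one level down, until the operation budget is spent; the proof shows this greedy maximum equals the binary-search optimum.
import Mathlib
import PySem

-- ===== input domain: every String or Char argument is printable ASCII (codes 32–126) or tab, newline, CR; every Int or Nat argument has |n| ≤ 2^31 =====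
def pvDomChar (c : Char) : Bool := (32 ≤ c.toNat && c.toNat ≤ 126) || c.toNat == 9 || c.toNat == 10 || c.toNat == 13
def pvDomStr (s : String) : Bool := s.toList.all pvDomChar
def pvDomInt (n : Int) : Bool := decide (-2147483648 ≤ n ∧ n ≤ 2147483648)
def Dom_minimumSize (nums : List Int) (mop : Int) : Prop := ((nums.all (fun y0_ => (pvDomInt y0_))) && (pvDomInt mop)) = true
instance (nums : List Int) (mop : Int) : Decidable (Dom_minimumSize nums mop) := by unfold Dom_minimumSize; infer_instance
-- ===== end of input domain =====

-- B replaces A's binary search over the answer by a direct greedy simulation that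
-- splits the bag with the currently largest piece once per operation; objective:
-- alternative algorithm (not faster for large mop).


-- ===== PORT A =====
-- the inner function `can(mv)`: loop over nums with accumulator op and early False
def pvCan (mop mv : Int) : Int → List Int → Bool
  | _,  [] => true
  | op, x :: xs =>
    if x ≤ mv then pvCan mop mv op xs
    else
      let op' := op + (PySem.Int.floordiv x mv - (if PySem.Int.mod x mv == 0 then 1 else 0))
      if mop < op' then false else pvCan mop mv op' xs

-- the `while lo < hi` binary-search loop (fuel only makes the loop total;
-- the initial fuel below provably suffices, see pvLoopA_spec)
def pvLoopA (fuel : Nat) (nums : List Int) (mop lo hi : Int) : Int :=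
  match fuel with
  | 0 => lo
  | f + 1 =>
    if lo < hi then
      let mid := PySem.Int.floordiv (lo + hi) 2
      if pvCan mop mid 0 nums = true then pvLoopA f nums mop lo mid
      else pvLoopA f nums mop (mid + 1) hi
    else lo

def minimumSize (nums : List Int) (mop : Int) : Int :=
  let hi := (PySem.List.max? nums (fun y => y)).getD 0
  pvLoopA ((hi - 1).toNat + 1) nums mop 1 hi

-- ===== PORT B =====
-- piece(b) = -(-x // k), the exact ceiling of x/k for a bag (x, k)
def pvPiece (b : Int × Int) : Int := -(PySem.Int.floordiv (-b.1) b.2)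

-- best = max(piece(b) for b in bags)  (empty bags never reached inside Pre_)
def pvBest (bags : List (Int × Int)) : Int :=
  (PySem.List.max? (bags.map pvPiece) (fun v => v)).getD 0

-- the loop body: at the first index with piece == best, set k2 = min(ceil(x/(best-1)), k+ops);
-- returns the updated bag list together with the operations charged (k2 - k)
def pvBatch (best ops : Int) : List (Int × Int) → (List (Int × Int) × Int)
  | [] => ([], 0)
  | b :: bs =>
    if pvPiece b = best then
      let k2 := min (-(PySem.Int.floordiv (-b.1) (best - 1))) (b.2 + ops)
      ((b.1, k2) :: bs, k2 - b.2)
    else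
      let r := pvBatch best ops bs
      (b :: r.1, r.2)

-- `while ops > 0 and best > 1: batch-split; recompute best` (the fuel only makes the
-- loop total; every iteration charges at least one operation, so mop.toNat suffices)
def pvGreedy (fuel : Nat) (bags : List (Int × Int)) (best ops : Int) : Int :=
  match fuel with
  | 0 => best
  | f + 1 =>
    if 0 < ops ∧ 1 < best then
      let r := pvBatch best ops bags
      pvGreedy f r.1 (pvBest r.1) (ops - r.2)
    else best

def minimumSize_alt (nums : List Int) (mop : Int) : Int :=
  let bags := nums.map (fun x => (x, (1 : Int)))
  let best := pvBest bags
  max (pvGreedy mop.toNat bags best mop) 1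

-- ===== PRECONDITION & SPEC =====
-- Python's max([]) raises ValueError in both A and B: the empty list is excluded.
def Pre_minimumSize (nums : List Int) (mop : Int) : Prop := nums ≠ []
instance (nums : List Int) (mop : Int) : Decidable (Pre_minimumSize nums mop) := by
  unfold Pre_minimumSize; infer_instance

def pvWitness_minimumSize : List Int × Int := ([7, 3], 1)

def Spec_minimumSize (nums : List Int) (mop : Int) (out : Int) : Prop := out = minimumSize_alt nums mop
instance (nums : List Int) (mop : Int) (out : Int) : Decidable (Spec_minimumSize nums mop out) := by unfold Spec_minimumSize; infer_instance

-- ===== CLAIM (what is proved, stated in full; the proofs are below) =====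
def Claim_equal_minimumSize : Prop := ∀ (nums : List Int) (mop : Int), Dom_minimumSize nums mop → Pre_minimumSize nums mop → Spec_minimumSize nums mop (minimumSize nums mop)

-- ===== LEMMAS AND PROOFS =====

-- A's split count at threshold m: sum over x > m of (ceil(x/m) - 1) (a proof-side quantity)
def pvSplits (nums : List Int) (m : Int) : Int :=
  ((nums.filter (fun x => decide (m < x))).map
    (fun x => -(PySem.Int.floordiv (-x) m) - 1)).sum

-- total splits performed so far on a bag list
def pvTot (bags : List (Int × Int)) : Int := (bags.map (fun b => b.2 - 1)).sum

-- greedy invariant: every bag was split only while its piece still dominated G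
def pvInv (G : Int) (bags : List (Int × Int)) : Prop :=
  ∀ b ∈ bags, 1 ≤ b.2 ∧ (b.2 = 1 ∨ (2 ≤ b.2 ∧ G ≤ pvPiece (b.1, b.2 - 1)))

-- bracket facts for the ceiling division
theorem pvCeil_bracket (x m : Int) (hm : 0 < m) :
    (-(PySem.Int.floordiv (-x) m) - 1) * m < x ∧ x ≤ -(PySem.Int.floordiv (-x) m) * m :=
  (PySem.Int.neg_floordiv_neg_eq_iff_of_pos hm).mp rfl

theorem pvFloor_bracket (x m : Int) (hm : 0 < m) :
    PySem.Int.floordiv x m * m ≤ x ∧ x < (PySem.Int.floordiv x m + 1) * m :=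
  (PySem.Int.floordiv_eq_iff_of_pos hm).mp rfl

-- A's increment equals the ceiling term on the processed elements
theorem pvTerm_eq (x m : Int) (hm : 0 < m) :
    PySem.Int.floordiv x m - (if PySem.Int.mod x m == 0 then 1 else 0)
      = -(PySem.Int.floordiv (-x) m) - 1 := by
  have hb := pvCeil_bracket x m hm
  have hq := pvFloor_bracket x m hm
  have hmod := PySem.Int.floordiv_mul_add_mod x m
  set c := -(PySem.Int.floordiv (-x) m) with hc
  set q := PySem.Int.floordiv x m with hqd
  by_cases h : PySem.Int.mod x m = 0
  · simp only [h, beq_self_eq_true, if_pos]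
    have hxm : x = q * m := by omega
    have h1 : c - 1 < q := lt_of_mul_lt_mul_right (by rw [← hxm]; exact hb.1) (le_of_lt hm)
    have h2 : q ≤ c := le_of_mul_le_mul_right (by rw [← hxm]; exact hb.2) hm
    omega
  · have hbeq : (PySem.Int.mod x m == 0) = false := by simpa using h
    simp only [hbeq, Bool.false_eq_true, if_false]
    have hxm : q * m ≠ x := by omega
    have hlt : q * m < x := lt_of_le_of_ne hq.1 hxm
    have h1 : q < c := lt_of_mul_lt_mul_right (lt_of_lt_of_le hlt hb.2) (le_of_lt hm)
    have h2 : c - 1 < q + 1 := lt_of_mul_lt_mul_right (lt_trans hb.1 hq.2) (le_of_lt hm)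
    omega

theorem pvTerm_pos (x m : Int) (hm : 0 < m) (hx : m < x) :
    1 ≤ -(PySem.Int.floordiv (-x) m) - 1 := by
  have hb := pvCeil_bracket x m hm
  nlinarith [hb.2]

theorem pvSplits_cons (x : Int) (xs : List Int) (m : Int) :
    pvSplits (x :: xs) m
      = (if m < x then -(PySem.Int.floordiv (-x) m) - 1 else 0) + pvSplits xs m := by
  by_cases h : m < x <;> simp [pvSplits, h]

theorem pvSplits_nonneg (xs : List Int) (m : Int) (hm : 0 < m) : 0 ≤ pvSplits xs m := by
  induction xs with
  | nil => simp [pvSplits]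
  | cons x xs ih =>
    rw [pvSplits_cons]
    by_cases h : m < x
    · have := pvTerm_pos x m hm h
      rw [if_pos h]; omega
    · rw [if_neg h]; omega

theorem pvSplits_pos (xs : List Int) (m x : Int) (hm : 0 < m) (hmem : x ∈ xs) (hx : m < x) :
    1 ≤ pvSplits xs m := by
  induction xs with
  | nil => cases hmem
  | cons y ys ih =>
    rw [pvSplits_cons]
    rcases List.mem_cons.mp hmem with h | h
    · subst h
      have := pvTerm_pos x m hm hx
      have := pvSplits_nonneg ys m hm
      rw [if_pos hx]; omega
    · have h1 := ih h
      by_cases hy : m < y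
      · have := pvTerm_pos y m hm hy
        rw [if_pos hy]; omega
      · rw [if_neg hy]; omega

-- `can(m)` returns True iff the remaining split count is zero or fits the budget
theorem pvCan_iff (mop m : Int) (hm : 0 < m) :
    ∀ (xs : List Int) (op : Int),
      (pvCan mop m op xs = true) ↔ (pvSplits xs m = 0 ∨ op + pvSplits xs m ≤ mop) := by
  intro xs
  induction xs with
  | nil => intro op; simp [pvCan, pvSplits]
  | cons x ys ih =>
    intro op
    rw [pvSplits_cons]
    by_cases hx : x ≤ m
    · rw [show pvCan mop m op (x :: ys) = pvCan mop m op ys from by rw [pvCan, if_pos hx],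
        if_neg (by omega)]
      simpa using ih op
    · have hmx : m < x := by omega
      have hteq := pvTerm_eq x m hm
      have htpos := pvTerm_pos x m hm hmx
      have hS := pvSplits_nonneg ys m hm
      rw [if_pos hmx]
      set t := -(PySem.Int.floordiv (-x) m) - 1 with ht
      by_cases hov : mop < op + t
      · rw [show pvCan mop m op (x :: ys) = false from by
          rw [pvCan, if_neg (by omega)]; simp only [hteq, ht]; rw [if_pos hov]]
        simp only [Bool.false_eq_true, false_iff]
        omega
      · rw [show pvCan mop m op (x :: ys) = pvCan mop m (op + t) ys from by
          rw [pvCan, if_neg (by omega)]; simp only [hteq, ht]; rw [if_neg hov]]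
        rw [ih (op + t)]
        omega

theorem pvSplits_anti_term (x m m' : Int) (hm : 0 < m) (hmm : m ≤ m') (hx : m' < x) :
    -(PySem.Int.floordiv (-x) m') - 1 ≤ -(PySem.Int.floordiv (-x) m) - 1 := by
  have hb := pvCeil_bracket x m hm
  have hb' := pvCeil_bracket x m' (by omega)
  have hc : 1 ≤ -(PySem.Int.floordiv (-x) m) - 1 := pvTerm_pos x m hm (by omega)
  nlinarith [hb.2, hb'.1]

theorem pvSplits_anti (xs : List Int) (m m' : Int) (hm : 0 < m) (hmm : m ≤ m') :
    pvSplits xs m' ≤ pvSplits xs m := by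
  induction xs with
  | nil => simp [pvSplits]
  | cons x ys ih =>
    rw [pvSplits_cons, pvSplits_cons]
    by_cases h' : m' < x
    · rw [if_pos h', if_pos (by omega)]
      have := pvSplits_anti_term x m m' hm hmm h'
      omega
    · rw [if_neg h']
      by_cases h : m < x
      · have := pvTerm_pos x m hm h
        rw [if_pos h]; omega
      · rw [if_neg h]; omega

-- monotonicity of the feasibility predicate
theorem pvCan_mono (nums : List Int) (mop m m' : Int) (hm : 0 < m) (hmm : m ≤ m')
    (h : pvCan mop m 0 nums = true) : pvCan mop m' 0 nums = true := by
  rw [pvCan_iff mop m hm nums 0] at h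
  rw [pvCan_iff mop m' (by omega) nums 0]
  have h1 := pvSplits_anti nums m m' hm hmm
  have h2 := pvSplits_nonneg nums m' (by omega)
  omega

-- A's binary search returns the least feasible value of [lo, hi] (any sufficient fuel)
theorem pvLoopA_spec (nums : List Int) (mop : Int) :
    ∀ (f : Nat) (lo hi : Int), (hi - lo).toNat < f → 0 < lo → lo ≤ hi →
      pvCan mop hi 0 nums = true →
      (lo ≤ pvLoopA f nums mop lo hi ∧ pvLoopA f nums mop lo hi ≤ hi ∧
        pvCan mop (pvLoopA f nums mop lo hi) 0 nums = true ∧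
        ∀ m, lo ≤ m → m < pvLoopA f nums mop lo hi → ¬ (pvCan mop m 0 nums = true)) := by
  intro f
  induction f with
  | zero => intro lo hi hf; omega
  | succ f ih =>
    intro lo hi hf hlo hle hhi
    rw [pvLoopA]
    by_cases h : lo < hi
    · rw [if_pos h]
      have hmid := PySem.Int.floordiv_two_mid_bounds (le_of_lt h)
      have hmlt : PySem.Int.floordiv (lo + hi) 2 < hi :=
        (PySem.Int.floordiv_lt_iff_lt_mul (by omega)).mpr (by omega)
      set mid := PySem.Int.floordiv (lo + hi) 2 with hmiddef
      by_cases hcan : pvCan mop mid 0 nums = true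
      · rw [if_pos hcan]
        exact
          let r := ih lo mid (by omega) hlo (by omega) hcan
          ⟨r.1, by omega, r.2.2.1, r.2.2.2⟩
      · rw [if_neg hcan]
        obtain ⟨r1, r2, r3, r4⟩ := ih (mid + 1) hi (by omega) (by omega) (by omega) hhi
        refine ⟨by omega, r2, r3, ?_⟩
        intro m hm1 hm2 hP
        by_cases hmm : m ≤ mid
        · exact hcan (pvCan_mono nums mop m mid (by omega) hmm hP)
        · exact r4 m (by omega) hm2 hP
    · rw [if_neg h]
      have : lo = hi := by omega
      subst this
      exact ⟨le_refl _, le_refl _, hhi, fun m h1 h2 => by omega⟩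

-- ==== facts about the greedy state ====

theorem pvBest_spec (bags : List (Int × Int)) (hne : bags ≠ []) :
    (∃ b ∈ bags, pvPiece b = pvBest bags) ∧ (∀ b ∈ bags, pvPiece b ≤ pvBest bags) := by
  have hne' : bags.map pvPiece ≠ [] := by simpa using hne
  obtain ⟨v, hv⟩ : ∃ v, PySem.List.max? (bags.map pvPiece) (fun v => v) = some v := by
    cases h : PySem.List.max? (bags.map pvPiece) (fun v => v) with
    | none => rw [PySem.List.max?_eq_none_iff] at h; exact absurd h hne'
    | some v => exact ⟨v, rfl⟩
  have hmem := PySem.List.max?_mem hv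
  have hub := PySem.List.max?_isMax hv
  constructor
  · obtain ⟨b, hb, hbp⟩ := List.mem_map.mp hmem
    exact ⟨b, hb, by simp [pvBest, hv, hbp]⟩
  · intro b hb
    have := hub (pvPiece b) (List.mem_map.mpr ⟨b, hb, rfl⟩)
    simpa [pvBest, hv] using this

theorem pvPiece_one (x : Int) : pvPiece (x, 1) = x := by
  simp [pvPiece]

theorem pvPiece_pos (x k : Int) (hx : 1 ≤ x) (hk : 1 ≤ k) : 1 ≤ pvPiece (x, k) := by
  have hb := pvCeil_bracket x k (by omega)
  by_contra h
  have hc : pvPiece (x, k) ≤ 0 := by omega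
  have : -(PySem.Int.floordiv (-x) k) * k ≤ 0 := by
    have := mul_nonpos_of_nonpos_of_nonneg (show -(PySem.Int.floordiv (-x) k) ≤ 0 from hc)
      (show (0:Int) ≤ k by omega)
    simpa using this
  simp only [pvPiece] at *
  omega

-- piece = G ≥ 2 forces a genuinely large bag
theorem pvPiece_big (x k G : Int) (hk : 1 ≤ k) (hG : 2 ≤ G) (hp : pvPiece (x, k) = G) :
    k * (G - 1) < x ∧ x ≤ k * G := by
  have hb := pvCeil_bracket x k (by omega)
  simp only [pvPiece] at hp
  constructor
  · nlinarith [hb.1]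
  · nlinarith [hb.2]

-- upper-bound direction: if every piece is ≤ G then f(G) ≤ total splits
theorem pvSplits_le_tot (G : Int) (_hG : 1 ≤ G) :
    ∀ (bags : List (Int × Int)),
      (∀ b ∈ bags, 1 ≤ b.2 ∧ pvPiece b ≤ G) →
      pvSplits (bags.map Prod.fst) G ≤ pvTot bags := by
  intro bags
  induction bags with
  | nil => intro _; simp [pvSplits, pvTot]
  | cons b bs ih =>
    intro h
    obtain ⟨hk, hub⟩ := h b List.mem_cons_self
    have htail := ih (fun c hc => h c (List.mem_cons_of_mem _ hc))
    simp only [List.map_cons]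
    rw [pvSplits_cons]
    simp only [pvTot, List.map_cons, List.sum_cons]
    simp only [pvTot] at htail
    by_cases hx : G < b.1
    · rw [if_pos hx]
      -- piece(x,k) ≤ G gives x ≤ k*G, hence ceil(x/G) ≤ k
      have hb := pvCeil_bracket b.1 b.2 (by omega)
      have hbG := pvCeil_bracket b.1 G (by omega)
      simp only [pvPiece] at hub
      have hxk : b.1 ≤ b.2 * G := by nlinarith [hb.2]
      have : -(PySem.Int.floordiv (-b.1) G) - 1 ≤ b.2 - 1 := by nlinarith [hbG.1]
      omega
    · rw [if_neg hx]; omega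

-- lower-bound direction: the invariant forces f(G-1) ≥ total splits per bag …
theorem pvTot_le_splits (G : Int) (hG : 2 ≤ G) :
    ∀ (bags : List (Int × Int)), pvInv G bags →
      pvTot bags ≤ pvSplits (bags.map Prod.fst) (G - 1) := by
  intro bags
  induction bags with
  | nil => intro _; simp [pvSplits, pvTot]
  | cons b bs ih =>
    intro h
    obtain ⟨hk, hinv⟩ := h b List.mem_cons_self
    have htail := ih (fun c hc => h c (List.mem_cons_of_mem _ hc))
    simp only [List.map_cons]
    rw [pvSplits_cons]
    simp only [pvTot, List.map_cons, List.sum_cons]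
    simp only [pvTot] at htail
    rcases hinv with h1 | ⟨hk2, h2⟩
    · -- never split: contributes 0, term is ≥ 0 when counted
      rw [h1]
      by_cases hx : G - 1 < b.1
      · have := pvTerm_pos b.1 (G - 1) (by omega) hx
        rw [if_pos hx]; omega
      · rw [if_neg hx]; omega
    · -- split bags: G ≤ ceil(x/(k-1)) gives (k-1)(G-1) < x, hence ceil(x/(G-1)) ≥ k
      have hbb := pvCeil_bracket b.1 (b.2 - 1) (by omega)
      simp only [pvPiece] at h2
      have hxbig : (b.2 - 1) * (G - 1) < b.1 := by nlinarith [hbb.1]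
      have hx : G - 1 < b.1 := by nlinarith
      rw [if_pos hx]
      have hbG := pvCeil_bracket b.1 (G - 1) (by omega)
      have : b.2 - 1 ≤ -(PySem.Int.floordiv (-b.1) (G - 1)) - 1 := by nlinarith [hbG.2]
      omega

-- … and strictly, because some bag attains the maximum G
theorem pvTot_lt_splits (G : Int) (hG : 2 ≤ G) (bags : List (Int × Int))
    (hinv : pvInv G bags) (hw : ∃ b ∈ bags, pvPiece b = G) :
    pvTot bags + 1 ≤ pvSplits (bags.map Prod.fst) (G - 1) := by
  obtain ⟨b, hb, hbp⟩ := hw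
  obtain ⟨l, r, rfl⟩ := List.append_of_mem hb
  have hkb : 1 ≤ b.2 := (hinv b hb).1
  have hbig := pvPiece_big b.1 b.2 G hkb hG hbp
  have hinvl : pvInv G l := fun c hc => hinv c (by simp [hc])
  have hinvr : pvInv G r := fun c hc => hinv c (by simp [hc])
  have hSl := pvTot_le_splits G hG l hinvl
  have hSr := pvTot_le_splits G hG r hinvr
  have happ : ∀ (xs ys : List (Int × Int)) (m : Int),
      pvSplits ((xs ++ ys).map Prod.fst) m
        = pvSplits (xs.map Prod.fst) m + pvSplits (ys.map Prod.fst) m := by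
    intro xs ys m
    simp [pvSplits, List.filter_append]
  have htapp : ∀ (xs ys : List (Int × Int)), pvTot (xs ++ ys) = pvTot xs + pvTot ys := by
    intro xs ys; simp [pvTot]
  rw [show l ++ b :: r = l ++ [b] ++ r by simp] at *
  rw [happ, happ, htapp, htapp]
  -- the witness bag alone contributes ≥ k (one more than its k-1 splits)
  have hx : G - 1 < b.1 := by nlinarith [hbig.1]
  have hwit : pvTot [b] + 1 ≤ pvSplits ([b].map Prod.fst) (G - 1) := by
    simp only [List.map_cons, List.map_nil]
    rw [pvSplits_cons, if_pos hx]
    have hbG := pvCeil_bracket b.1 (G - 1) (by omega)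
    have : b.2 ≤ -(PySem.Int.floordiv (-b.1) (G - 1)) - 1 := by nlinarith [hbG.2, hbig.1]
    simp [pvSplits, pvTot]
    omega
  omega

-- the all-ones initial state
theorem pvInit_fst (nums : List Int) :
    (nums.map (fun x => (x, (1 : Int)))).map Prod.fst = nums := by
  induction nums with
  | nil => rfl
  | cons x xs ih => simp only [List.map_cons, ih]

theorem pvInit_pieces (nums : List Int) :
    (nums.map (fun x => (x, (1 : Int)))).map pvPiece = nums := by
  induction nums with
  | nil => rfl
  | cons x xs ih => simp only [List.map_cons, ih, pvPiece_one]

theorem pvInit_tot (nums : List Int) :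
    pvTot (nums.map (fun x => (x, (1 : Int)))) = 0 := by
  induction nums with
  | nil => rfl
  | cons x xs ih =>
    simp only [pvTot, List.map_cons, List.sum_cons] at ih ⊢
    omega

-- one batch of the loop body: what pvBatch does to a state whose maximum is G
theorem pvBatch_spec (G ops : Int) (hG2 : 2 ≤ G) (hops : 1 ≤ ops) :
    ∀ bags : List (Int × Int),
      (∃ b ∈ bags, pvPiece b = G) →
      (∀ b ∈ bags, 1 ≤ b.2) →
      ((pvBatch G ops bags).1.map Prod.fst = bags.map Prod.fst ∧
       pvTot (pvBatch G ops bags).1 = pvTot bags + (pvBatch G ops bags).2 ∧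
       1 ≤ (pvBatch G ops bags).2 ∧ (pvBatch G ops bags).2 ≤ ops ∧
       ∀ b' ∈ (pvBatch G ops bags).1,
         b' ∈ bags ∨ ∃ b ∈ bags, pvPiece b = G ∧ b'.1 = b.1 ∧ b.2 + 1 ≤ b'.2 ∧
           pvPiece b' ≤ G ∧ G ≤ pvPiece (b'.1, b'.2 - 1)) := by
  intro bags
  induction bags with
  | nil => intro hw _; obtain ⟨b, hb, _⟩ := hw; cases hb
  | cons b bs ih =>
    intro hw hk1
    rw [pvBatch]
    by_cases hb : pvPiece b = G
    · rw [if_pos hb]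
      have hk := hk1 b List.mem_cons_self
      have hbig := pvPiece_big b.1 b.2 G hk hG2 hb
      set c := -(PySem.Int.floordiv (-b.1) (G - 1)) with hc
      have hbc := pvCeil_bracket b.1 (G - 1) (by omega)
      rw [← hc] at hbc
      have hkc : b.2 + 1 ≤ c := by nlinarith [hbc.2, hbig.1]
      set k2 := min c (b.2 + ops) with hk2
      have hk2lo : b.2 + 1 ≤ k2 := by omega
      have hk2c : k2 ≤ c := by omega
      refine ⟨by simp, ?_, by simp; omega, by simp; omega, ?_⟩
      · simp only [pvTot, List.map_cons, List.sum_cons]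
        omega
      · intro b' hb'
        simp only [List.mem_cons] at hb'
        rcases hb' with rfl | h'
        · refine Or.inr ⟨b, List.mem_cons_self, hb, rfl, hk2lo, ?_, ?_⟩
          · -- pvPiece (b.1, k2) ≤ G since k2 ≥ b.2
            have hbr := pvCeil_bracket b.1 k2 (by omega)
            simp only [pvPiece]
            nlinarith [hbr.1, hbig.2]
          · -- G ≤ pvPiece (b.1, k2 - 1) since k2 - 1 < c
            have hbr := pvCeil_bracket b.1 (k2 - 1) (by omega)
            simp only [pvPiece]
            nlinarith [hbr.2, hbc.1]
        · exact Or.inl (List.mem_cons_of_mem _ h')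
    · rw [if_neg hb]
      have hw' : ∃ x ∈ bs, pvPiece x = G := by
        obtain ⟨x, hx, hxp⟩ := hw
        rcases List.mem_cons.mp hx with rfl | hx'
        · exact absurd hxp hb
        · exact ⟨x, hx', hxp⟩
      obtain ⟨i1, i2, i3, i4, i5⟩ := ih hw' (fun x hx => hk1 x (List.mem_cons_of_mem _ hx))
      refine ⟨by simp [i1], ?_, by simpa using i3, by simpa using i4, ?_⟩
      · simp only [pvTot, List.map_cons, List.sum_cons] at i2 ⊢
        omega
      · intro b' hb'
        simp only [List.mem_cons] at hb'
        rcases hb' with rfl | h'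
        · exact Or.inl List.mem_cons_self
        · rcases i5 b' h' with h1 | ⟨x, hx, hrest⟩
          · exact Or.inl (List.mem_cons_of_mem _ h1)
          · exact Or.inr ⟨x, List.mem_cons_of_mem _ hx, hrest⟩

-- trivial exit of the greedy loop
theorem pvGreedy_le_one (bags : List (Int × Int)) (G : Int) (hG : G ≤ 1) :
    ∀ n ops, pvGreedy n bags G ops = G := by
  intro n ops; cases n with
  | zero => rfl
  | succ f => rw [pvGreedy, if_neg (fun h => absurd h.2 (by omega))]

-- main greedy invariant: the loop result is exactly the least feasible threshold
theorem pvGreedy_spec (nums : List Int) (mx mop : Int) (hmx2 : 2 ≤ mx)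
    (hmem : mx ∈ nums) :
    ∀ (n : Nat) (bags : List (Int × Int)) (G ops : Int),
      bags.map Prod.fst = nums → pvBest bags = G → pvInv G bags →
      pvTot bags + ops = mop → 0 ≤ ops → ops ≤ (n : Int) →
      (1 ≤ pvGreedy n bags G ops ∧ pvSplits nums (pvGreedy n bags G ops) ≤ mop ∧
        (pvGreedy n bags G ops = 1 ∨ mop < pvSplits nums (pvGreedy n bags G ops - 1))) := by
  intro n
  induction n with
  | zero =>
    intro bags G ops hfst hbest hinv htot hops0 hopsn
    have hne : bags ≠ [] := by
      intro h
      have hn : nums = [] := by rw [← hfst, h]; rfl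
      rw [hn] at hmem; cases hmem
    obtain ⟨hatt, hubG⟩ := pvBest_spec bags hne
    rw [hbest] at hatt hubG
    obtain ⟨bm, hbm, hbmx⟩ : ∃ b ∈ bags, b.1 = mx := by
      rw [← hfst] at hmem
      obtain ⟨b, hb, hbe⟩ := List.mem_map.mp hmem
      exact ⟨b, hb, hbe⟩
    have hG1 : 1 ≤ G := by
      have hkb := (hinv bm hbm).1
      have h1 := pvPiece_pos bm.1 bm.2 (by omega) hkb
      have h2 := hubG bm hbm
      have he : pvPiece (bm.1, bm.2) = pvPiece bm := rfl
      omega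
    have hopse : ops = 0 := by
      have : (0 : Int) ≤ (0 : Nat) - 0 := by norm_num
      omega
    simp only [pvGreedy]
    refine ⟨hG1, ?_, ?_⟩
    · have := pvSplits_le_tot G hG1 bags
        (fun b hb => ⟨(hinv b hb).1, hubG b hb⟩)
      rw [hfst] at this
      omega
    · by_cases h1 : G = 1
      · exact Or.inl h1
      · right
        have := pvTot_lt_splits G (by omega) bags hinv hatt
        rw [hfst] at this
        omega
  | succ f ih =>
    intro bags G ops hfst hbest hinv htot hops0 hopsn
    have hne : bags ≠ [] := by
      intro h
      have hn : nums = [] := by rw [← hfst, h]; rfl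
      rw [hn] at hmem; cases hmem
    obtain ⟨hatt, hubG⟩ := pvBest_spec bags hne
    rw [hbest] at hatt hubG
    obtain ⟨bm, hbm, hbmx⟩ : ∃ b ∈ bags, b.1 = mx := by
      rw [← hfst] at hmem
      obtain ⟨b, hb, hbe⟩ := List.mem_map.mp hmem
      exact ⟨b, hb, hbe⟩
    have hG1 : 1 ≤ G := by
      have hkb := (hinv bm hbm).1
      have h1 := pvPiece_pos bm.1 bm.2 (by omega) hkb
      have h2 := hubG bm hbm
      have he : pvPiece (bm.1, bm.2) = pvPiece bm := rfl
      omega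
    rw [pvGreedy]
    by_cases hcond : 0 < ops ∧ 1 < G
    · rw [if_pos hcond]
      have hG2 : 2 ≤ G := by omega
      obtain ⟨hbf, hbt, hu1, hu2, hcases⟩ :=
        pvBatch_spec G ops hG2 (by omega) bags hatt (fun b hb => (hinv b hb).1)
      set bags' := (pvBatch G ops bags).1 with hbags'
      have hfst' : bags'.map Prod.fst = nums := by rw [hbags', hbf, hfst]
      have hne' : bags' ≠ [] := by
        intro h
        have hn : nums = [] := by rw [← hfst', h]; rfl
        rw [hn] at hmem; cases hmem
      obtain ⟨hatt', hubG'⟩ := pvBest_spec bags' hne'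
      have hub' : ∀ b' ∈ bags', pvPiece b' ≤ G := by
        intro b' hb'
        rcases hcases b' hb' with h | ⟨b, hb, _, _, _, hle, _⟩
        · exact hubG b' h
        · exact hle
      have hG'le : pvBest bags' ≤ G := by
        obtain ⟨b', hb', hbp'⟩ := hatt'
        rw [← hbp']; exact hub' b' hb'
      have hinv' : pvInv (pvBest bags') bags' := by
        intro b' hb'
        rcases hcases b' hb' with h | ⟨b, hb, hbp, hfeq, hklo, hle, hge⟩
        · obtain ⟨hk, hrest⟩ := hinv b' h
          refine ⟨hk, ?_⟩
          rcases hrest with h1 | ⟨hk2, h2⟩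
          · exact Or.inl h1
          · exact Or.inr ⟨hk2, by omega⟩
        · have hkb := (hinv b hb).1
          exact ⟨by omega, Or.inr ⟨by omega, by omega⟩⟩
      have htot' : pvTot bags' + (ops - (pvBatch G ops bags).2) = mop := by
        rw [hbags', hbt]; omega
      exact ih bags' (pvBest bags') (ops - (pvBatch G ops bags).2) hfst' rfl hinv' htot'
        (by omega) (by push_cast at hopsn ⊢; omega)
    · rw [if_neg hcond]
      refine ⟨hG1, ?_, ?_⟩
      · have := pvSplits_le_tot G hG1 bags
          (fun b hb => ⟨(hinv b hb).1, hubG b hb⟩)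
        rw [hfst] at this
        omega
      · by_cases h1 : G = 1
        · exact Or.inl h1
        · right
          have hopse : ops = 0 := by
            rcases not_and_or.mp hcond with h | h
            · omega
            · omega
          have := pvTot_lt_splits G (by omega) bags hinv hatt
          rw [hfst] at this
          omega

-- ===== VERDICT (by name: the statement is the Claim_ definition above) =====
theorem minimumSize_spec : Claim_equal_minimumSize := by
  intro nums mop hdom hpre
  unfold Spec_minimumSize
  obtain ⟨mx, hmax⟩ : ∃ m, PySem.List.max? nums (fun y => y) = some m := by
    cases h : PySem.List.max? nums (fun y => y) with
    | none => rw [PySem.List.max?_eq_none_iff] at h; exact absurd h hpre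
    | some m => exact ⟨m, rfl⟩
  have hmem : mx ∈ nums := PySem.List.max?_mem hmax
  have hub : ∀ y ∈ nums, y ≤ mx := PySem.List.max?_isMax hmax
  unfold minimumSize minimumSize_alt
  rw [hmax]
  simp only [Option.getD_some]
  -- initial greedy state: every bag is one piece, so best = max(nums) = mx
  set bags0 := nums.map (fun x => (x, (1 : Int))) with hbags0
  have hfst0 : bags0.map Prod.fst = nums := by rw [hbags0, pvInit_fst]
  have hpieces0 : bags0.map pvPiece = nums := by rw [hbags0, pvInit_pieces]
  have hbest0 : pvBest bags0 = mx := by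
    rw [pvBest, hpieces0, hmax]; rfl
  rw [hbest0]
  by_cases hmx2 : mx ≤ 1
  · -- degenerate: A's loop never runs; B's greedy keeps best = mx and clamps to 1
    rw [pvLoopA, if_neg (by omega), pvGreedy_le_one bags0 mx hmx2 mop.toNat mop]
    omega
  · have hSmxter : ∀ y ∈ nums, y ≤ mx := hub
    have hSmx : pvSplits nums mx = 0 := by
      have : nums.filter (fun x => decide (mx < x)) = [] := by
        rw [List.filter_eq_nil_iff]
        intro x hx
        simpa using not_lt.mpr (hub x hx)
      simp [pvSplits, this]
    have hPhi : pvCan mop mx 0 nums = true := by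
      rw [pvCan_iff mop mx (by omega) nums 0]; omega
    obtain ⟨hr1, hr2, hr3, hr4⟩ :=
      pvLoopA_spec nums mop ((mx - 1).toNat + 1) 1 mx (by omega) (by omega) (by omega) hPhi
    set r := pvLoopA ((mx - 1).toNat + 1) nums mop 1 mx with hrdef
    by_cases hmop : 0 ≤ mop
    · -- main case: run the greedy invariant from the all-ones state
      have hinv0 : pvInv mx bags0 := by
        intro b hb
        rw [hbags0] at hb
        obtain ⟨x, _, rfl⟩ := List.mem_map.mp hb
        exact ⟨le_refl 1, Or.inl rfl⟩
      have htot0 : pvTot bags0 + mop = mop := by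
        rw [hbags0, pvInit_tot]; omega
      obtain ⟨hR1, hR2, hR3⟩ :=
        pvGreedy_spec nums mx mop (by omega) hmem mop.toNat bags0 mx mop hfst0 hbest0 hinv0 htot0
          hmop (by omega)
      set R := pvGreedy mop.toNat bags0 mx mop with hRdef
      have hcanR : pvCan mop R 0 nums = true := by
        rw [pvCan_iff mop R (by omega) nums 0]; omega
      -- r ≤ R by minimality of r
      have hrR : r ≤ R := by
        by_contra h
        exact hr4 R (by omega) (by omega) hcanR
      -- R ≤ r
      have hRr : R ≤ r := by
        rcases hR3 with h1 | h2
        · omega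
        · by_contra h
          have hcr := hr3
          rw [pvCan_iff mop r (by omega) nums 0] at hcr
          have hmono := pvSplits_anti nums r (R - 1) (by omega) (by omega)
          have hpos : 1 ≤ pvSplits nums r := by
            have hrmx : r < mx := by
              by_contra hc
              have hreq : r = mx := by omega
              have h0 : pvSplits nums r = 0 := by rw [hreq]; exact hSmx
              omega
            exact pvSplits_pos nums r mx (by omega) hmem hrmx
          omega
      have : r = R := by omega
      rw [this]
      omega
    · -- mop < 0: the greedy loop body never runs; A's search climbs to mx
      have htn : mop.toNat = 0 := by omega
      rw [htn]
      simp only [pvGreedy]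
      have hreq : r = mx := by
        by_contra h
        have hrmx : r < mx := by omega
        have hcr := hr3
        rw [pvCan_iff mop r (by omega) nums 0] at hcr
        have := pvSplits_pos nums r mx (by omega) hmem hrmx
        have := pvSplits_nonneg nums r (by omega)
        omega
      rw [hreq]
      omega
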